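-- pv_equiv track=rewrite | github.com/Heir-of-God/Project-S | Codeforces/Contests/educational_codeforces_round_167/B.py | calculate_max_subsequence
-- ===== SOURCE A (Python) =====
-- def calculate_max_subsequence(ss, sstring):
--     res = 0
--     l: int = len(ss)
--
--     for start_ind in range(l):
--         cur_n = 0
--         cur_ind: int = start_ind
--         for char in sstring:
--             if cur_ind == l:
--                 break
--             if char == ss[cur_ind]:
--                 cur_n += 1
--                 cur_ind += 1
--         res: int = max(res, cur_n)
--     return res
-- ===== SOURCE B (Python) =====
-- def calculate_max_subsequence(ss, sstring):
--     # Next-occurrence automaton: precompute, back to front, a table nxt where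
--     # nxt[p] maps each character c to the least index j >= p with sstring[j] == c.
--     # Then each start jumps through sstring via table lookups instead of scanning it.
--     m = len(sstring)
--     nxt = [None] * (m + 1)
--     nxt[m] = {}
--     for p in range(m - 1, -1, -1):
--         row = dict(nxt[p + 1])
--         row[sstring[p]] = p
--         nxt[p] = row
--     l = len(ss)
--     best = 0
--     for start in range(l):
--         if l - start <= best:
--             break  # no later start can beat best: a match from start has length <= l - start
--         pos = 0
--         cur = start
--         while cur < l:
--             j = nxt[pos].get(ss[cur], m)
--             if j == m:
--                 break
--             pos = j + 1
--             cur += 1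
--         best = max(best, cur - start)
--     return best
-- ===== Notes on version B (the rewrite author's own statement) =====
-- stated objective: faster
-- what changed: B precomputes a next-occurrence automaton over sstring (nxt[p][c] = least j >= p with sstring[j] == c, built back to front) and answers each start by O(match-length) table jumps, with an exact pruning that stops the start loop once the remaining length l-start cannot exceed the best match found; intended as faster, measured ~2.5x at the largest size both finished.
import Mathlib
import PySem

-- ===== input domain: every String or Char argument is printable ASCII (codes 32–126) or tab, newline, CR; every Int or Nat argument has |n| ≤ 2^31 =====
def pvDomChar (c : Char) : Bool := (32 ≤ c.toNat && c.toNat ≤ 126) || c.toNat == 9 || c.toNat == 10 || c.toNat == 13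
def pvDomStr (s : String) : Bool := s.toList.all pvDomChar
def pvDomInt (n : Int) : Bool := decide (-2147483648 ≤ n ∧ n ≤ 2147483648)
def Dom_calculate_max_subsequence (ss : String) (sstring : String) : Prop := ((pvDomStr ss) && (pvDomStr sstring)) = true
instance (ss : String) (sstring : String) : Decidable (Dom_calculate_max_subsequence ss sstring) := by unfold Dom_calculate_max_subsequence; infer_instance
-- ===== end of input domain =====

-- B precomputes a next-occurrence automaton over sstring (nxt[p][c] = least j ≥ p with
-- sstring[j] = c, built back to front), answers each start by table jumps instead of A's
-- full scan of sstring per start, and stops the start loop once l - start ≤ best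
-- (exact: a match from start has length ≤ l - start); intended as faster, measured ~2.5× at the
-- largest size both programs finished in a timing run.

-- ===== PORT A =====
-- inner loop of A: fold over sstring's characters, state (cur_n, cur_ind), with the break at cur_ind == l
def pvScanA (ts : List Char) (l : Nat) : List Char → Nat × Nat → Nat × Nat
  | [], st => st
  | c :: cs, (n, cur) =>
    if cur = l then (n, cur)
    else if c = ts.getD cur ' ' then pvScanA ts l cs (n + 1, cur + 1)
    else pvScanA ts l cs (n, cur)

def calculate_max_subsequence (ss : String) (sstring : String) : Int :=
  let ts := ss.toList
  let l := ts.length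
  let res := (List.range l).foldl
    (fun res start_ind => max res (pvScanA ts l sstring.toList (0, start_ind)).1) 0
  (res : Int)

-- ===== PORT B =====
-- the back-to-front table build 'for p in range(m-1,-1,-1): row = dict(nxt[p+1]); row[sstring[p]] = p; nxt[p] = row'
-- as structural recursion on the suffix of sstring starting at position p: result is [row p, row p+1, …, row m]
def pvBuildNxt : List Char → Nat → List (PySem.Dict Char Nat)
  | [], _ => [PySem.Dict.empty]
  | c :: rest, p =>
    let rows := pvBuildNxt rest (p + 1)
    ((rows.headD PySem.Dict.empty).insert c p) :: rows

-- B's while loop: j = nxt[pos].get(ss[cur], m); break on j == m, else jump to pos = j+1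
-- (pos is always ≤ m, so the list getD default is never consulted)
def pvJump (nxt : List (PySem.Dict Char Nat)) (ts : List Char) (l m : Nat) (pos cur : Nat) : Nat :=
  if _h : cur < l then
    let j := (nxt.getD pos PySem.Dict.empty).getD (ts.getD cur ' ') m
    if j = m then cur
    else pvJump nxt ts l m (j + 1) (cur + 1)
  else cur
termination_by l - cur

-- B's start loop with the exact pruning 'if l - start <= best: break'
def pvBest (nxt : List (PySem.Dict Char Nat)) (ts : List Char) (l m : Nat) (start best : Nat) : Nat :=
  if _h : start < l then
    if l - start ≤ best then best
    else pvBest nxt ts l m (start + 1) (max best (pvJump nxt ts l m 0 start - start))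
  else best
termination_by l - start

def calculate_max_subsequence_alt (ss : String) (sstring : String) : Int :=
  let cs := sstring.toList
  let m := cs.length
  let nxt := pvBuildNxt cs 0
  let ts := ss.toList
  let l := ts.length
  ((pvBest nxt ts l m 0 0 : Nat) : Int)

-- ===== PRECONDITION & SPEC =====
def Spec_calculate_max_subsequence (ss : String) (sstring : String) (out : Int) : Prop := out = calculate_max_subsequence_alt ss sstring
instance (ss : String) (sstring : String) (out : Int) : Decidable (Spec_calculate_max_subsequence ss sstring out) := by unfold Spec_calculate_max_subsequence; infer_instance

-- ===== CLAIM (what is proved, stated in full; the proofs are below) =====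
def Claim_equal_calculate_max_subsequence : Prop := ∀ (ss : String) (sstring : String), Dom_calculate_max_subsequence ss sstring → Spec_calculate_max_subsequence ss sstring (calculate_max_subsequence ss sstring)

-- ===== LEMMAS AND PROOFS =====

-- A's inner loop with only the cursor as state (cur_n is determined by it)
def pvScanC (ts : List Char) (l : Nat) : List Char → Nat → Nat
  | [], cur => cur
  | c :: cs, cur =>
    if cur = l then cur
    else if c = ts.getD cur ' ' then pvScanC ts l cs (cur + 1)
    else pvScanC ts l cs cur

theorem pvScanC_le (ts : List Char) (l : Nat) (cs : List Char) (cur : Nat) :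
    cur ≤ pvScanC ts l cs cur := by
  induction cs generalizing cur with
  | nil => simp [pvScanC]
  | cons c cs ih =>
    simp only [pvScanC]
    split_ifs with h1 h2
    · exact le_refl _
    · exact le_trans (Nat.le_succ _) (ih _)
    · exact ih _

theorem pvScanA_eq (ts : List Char) (l : Nat) (cs : List Char) (n cur : Nat) :
    pvScanA ts l cs (n, cur) = (n + (pvScanC ts l cs cur - cur), pvScanC ts l cs cur) := by
  induction cs generalizing n cur with
  | nil => simp [pvScanA, pvScanC]
  | cons c cs ih =>
    by_cases h1 : cur = l
    · simp [pvScanA, pvScanC, h1]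
    · by_cases h2 : c = ts.getD cur ' '
      · have hle := pvScanC_le ts l cs (cur + 1)
        simp only [pvScanA, pvScanC, if_neg h1, if_pos h2]
        rw [ih]
        simp only [Prod.mk.injEq]
        exact ⟨by omega, trivial⟩
      · simp only [pvScanA, pvScanC, if_neg h1, if_neg h2]
        exact ih n cur

-- rest-based form of the greedy scan
def pvScanR (ts : List Char) (l : Nat) : List Char → Nat → Nat
  | rest, cur =>
    if cur < l then
      match h : rest.idxOf? (ts.getD cur ' ') with
      | none => cur
      | some j => pvScanR ts l (rest.drop (j + 1)) (cur + 1)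
    else cur
termination_by rest _ => rest.length
decreasing_by
  have hj : j < rest.length := (List.idxOf?_eq_some_iff.mp h).choose
  simp [List.length_drop]; omega

theorem idxOf?_cons_ne {c d : Char} {cs : List Char} (h : c ≠ d) :
    (c :: cs).idxOf? d = (cs.idxOf? d).map (· + 1) := by
  simp [List.idxOf?_cons, h]

theorem pvScanC_eq_pvScanR (ts : List Char) (l : Nat) (cs : List Char) (cur : Nat)
    (h : cur ≤ l) : pvScanC ts l cs cur = pvScanR ts l cs cur := by
  induction hn : cs.length using Nat.strong_induction_on generalizing cs cur with
  | _ n ih =>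
  cases cs with
  | nil =>
    rw [pvScanR]
    simp [pvScanC, List.idxOf?_nil]
  | cons c cs =>
    rw [pvScanR]
    simp only [pvScanC]
    by_cases h1 : cur = l
    · simp [h1]
    · have hlt : cur < l := lt_of_le_of_ne h h1
      simp only [h1, hlt, if_pos]
      by_cases h2 : c = ts.getD cur ' '
      · simp only [if_pos h2]
        have : (c :: cs).idxOf? (ts.getD cur ' ') = some 0 := by
          simp [List.idxOf?_cons, h2]
        rw [this]
        simp only [List.drop_succ_cons, List.drop_zero]
        exact ih cs.length (by simp [← hn]) cs (cur + 1) (by omega) rfl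
      · simp only [if_neg h2]
        rw [idxOf?_cons_ne (fun hcd => h2 hcd)]
        cases h3 : cs.idxOf? (ts.getD cur ' ') with
        | none =>
          simp only [Option.map_none]
          have := ih cs.length (by simp [← hn]) cs cur h rfl
          rw [this, pvScanR, if_pos hlt, h3]
          simp
        | some j =>
          simp only [Option.map_some, List.drop_succ_cons]
          have := ih cs.length (by simp [← hn]) cs cur h rfl
          rw [this, pvScanR, if_pos hlt, h3]
          simp

-- the i-th row of the table is the head row of the table built on the suffix cs.drop i
theorem pvBuildNxt_getD (cs : List Char) (p i : Nat) (h : i ≤ cs.length) :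
    (pvBuildNxt cs p).getD i PySem.Dict.empty = (pvBuildNxt (cs.drop i) (p + i)).headD PySem.Dict.empty := by
  induction cs generalizing p i with
  | nil =>
    have hi : i = 0 := by simpa using h
    subst hi
    simp [pvBuildNxt]
  | cons c rest ih =>
    cases i with
    | zero => simp [pvBuildNxt]
    | succ i =>
      simp only [pvBuildNxt, List.getD_cons_succ, List.drop_succ_cons]
      rw [ih (p + 1) i (by simp at h; omega)]
      have hpi : p + 1 + i = p + (i + 1) := by omega
      rw [hpi]

-- head-row lookup is the least occurrence index of c in cs, offset by p
theorem pvBuildNxt_headI_getD (cs : List Char) (p : Nat) (c : Char) (d : Nat) :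
    ((pvBuildNxt cs p).headD PySem.Dict.empty).getD c d
      = (match cs.idxOf? c with | none => d | some k => p + k) := by
  induction cs generalizing p with
  | nil => simp [pvBuildNxt, List.idxOf?_nil, PySem.Dict.getD_empty]
  | cons c' rest ih =>
    simp only [pvBuildNxt, List.headD_cons]
    rw [PySem.Dict.getD_insert]
    by_cases h : c = c'
    · simp [h, List.idxOf?_cons]
    · rw [if_neg h, ih, idxOf?_cons_ne (fun hcd => h hcd.symm)]
      cases hk : rest.idxOf? c with
      | none => simp
      | some k =>
        simp only [Option.map_some]
        have : p + 1 + k = p + (k + 1) := by omega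
        rw [this]

theorem pvJump_eq_pvScanR (ts : List Char) (cs : List Char) (l : Nat) (pos cur : Nat)
    (hpos : pos ≤ cs.length) :
    pvJump (pvBuildNxt cs 0) ts l cs.length pos cur = pvScanR ts l (cs.drop pos) cur := by
  induction hfuel : l - cur using Nat.strong_induction_on generalizing pos cur with
  | _ n ih =>
  rw [pvJump, pvScanR]
  by_cases hlt : cur < l
  · simp only [dif_pos hlt, if_pos hlt]
    rw [pvBuildNxt_getD cs 0 pos hpos, pvBuildNxt_headI_getD]
    cases hk : (cs.drop pos).idxOf? (ts.getD cur ' ') with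
    | none => simp
    | some k =>
      have hklt : k < (cs.drop pos).length := (List.idxOf?_eq_some_iff.mp hk).choose
      simp only [List.length_drop] at hklt
      have hne : 0 + pos + k ≠ cs.length := by omega
      simp only [if_neg hne]
      have hdrop : cs.drop (0 + pos + k + 1) = (cs.drop pos).drop (k + 1) := by
        rw [List.drop_drop]; congr 1; omega
      rw [ih (l - (cur + 1)) (by omega) (0 + pos + k + 1) (cur + 1) (by omega) rfl, hdrop]
  · simp [dif_neg hlt, if_neg hlt]

theorem pvJump_le (nxt : List (PySem.Dict Char Nat)) (ts : List Char) (l m : Nat)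
    (pos cur : Nat) (h : cur ≤ l) : pvJump nxt ts l m pos cur ≤ l := by
  induction hfuel : l - cur using Nat.strong_induction_on generalizing pos cur with
  | _ n ih =>
  rw [pvJump]
  by_cases hlt : cur < l
  · simp only [dif_pos hlt]
    split_ifs with hj
    · exact h
    · exact ih (l - (cur + 1)) (by omega) _ (cur + 1) (by omega) rfl
  · simpa [dif_neg hlt] using h

theorem foldl_max_const {g : Nat → Nat} {best : Nat} (lst : List Nat)
    (h : ∀ s ∈ lst, g s ≤ best) :
    lst.foldl (fun b s => max b (g s)) best = best := by
  induction lst with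
  | nil => rfl
  | cons x xs ih =>
    simp only [List.foldl_cons]
    rw [Nat.max_eq_left (h x (by simp))]
    exact ih (fun s hs => h s (by simp [hs]))

theorem pvBest_eq (nxt : List (PySem.Dict Char Nat)) (ts : List Char) (l m : Nat)
    (start best : Nat) (h : start ≤ l) :
    pvBest nxt ts l m start best
      = (List.range' start (l - start)).foldl
          (fun b s => max b (pvJump nxt ts l m 0 s - s)) best := by
  induction hfuel : l - start using Nat.strong_induction_on generalizing start best with
  | _ n ih =>
  subst hfuel
  rw [pvBest]
  by_cases hlt : start < l
  · simp only [dif_pos hlt]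
    split_ifs with hbr
    · -- pruning: every later contribution is ≤ l - s ≤ l - start ≤ best
      rw [foldl_max_const]
      intro s hs
      have hmem := List.mem_range'_1.mp hs
      have hjl : pvJump nxt ts l m 0 s ≤ l := pvJump_le nxt ts l m 0 s (by omega)
      omega
    · have hrange : List.range' start (l - start)
          = start :: List.range' (start + 1) (l - (start + 1)) := by
        have h1 : l - start = (l - (start + 1)) + 1 := by omega
        rw [h1, List.range'_succ]
      rw [hrange]
      simp only [List.foldl_cons]
      exact ih (l - (start + 1)) (by omega) (start + 1) _ (by omega) rfl
  · have h0 : l - start = 0 := by omega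
    simp [dif_neg hlt, h0]

-- ===== VERDICT (by name: the statement is the Claim_ definition above) =====
theorem calculate_max_subsequence_spec : Claim_equal_calculate_max_subsequence := by
  intro ss sstring _
  unfold Spec_calculate_max_subsequence calculate_max_subsequence calculate_max_subsequence_alt
  simp only
  congr 1
  rw [pvBest_eq _ _ _ _ 0 0 (by omega), Nat.sub_zero, ← List.range_eq_range']
  apply PySem.List.foldl_congr_mem
  intro acc start hmem
  have hstart : start < ss.toList.length := List.mem_range.mp hmem
  rw [pvScanA_eq, pvJump_eq_pvScanR _ _ _ 0 start (by omega), List.drop_zero,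
    pvScanC_eq_pvScanR ss.toList ss.toList.length sstring.toList start (by omega)]
  simp
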